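/-
  THE CONTRACTS OF THE DRIVER (c/gif/src/gif_driver.c; c/gif/src/cextra.c): the digest (`digest_byte`, `digest_int`, `digest_bytes`,
  `digest_map`, `digest_extensions`, `digest_file`: it READS EVERY BYTE a client of DGifSlurp may read — every field of gif, every
  colour map, every raster, every extension block: so the theorem covers the result's use, not only its construction), `strncmp`,
  `gif_decode` (DGifOpen → DGifSlurp → digest → DGifCloseFile, in its own protected frame with the cursor), `prog_main`.
  Vocabulary: Gif/Spec/Common.lean (+ CommonMore.lean §8).

  THE DIGEST WRITES NOTHING but its stack and `*pixels`: its contracts are heap-level (`HeapPre`), with the piece of the forest each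
  function reads as a ghost (`m : Option Map`, `e : Option Exts`, the whole forest for `digest_file`).

  FRAMES (design/FRAMES.gif.txt):
      function            own                       callees (frame)                                              frame
      digest_byte         —                         —                                                                0
      digest_int          1 push = 8                digest_byte (0)                                          8 + 8 = 16
      digest_bytes        5 pushes = 40             digest_byte (0), a check (16)                     40 + 8 + 16 = 64
      digest_map          5 pushes = 40             digest_int (16), digest_byte (0), checks (16)     40 + 8 + 16 = 64
      digest_extensions   6 pushes + sub 8 = 56     digest_int (16), digest_bytes (64)                56 + 8 + 64 = 128
      digest_file         6 pushes + sub 40 = 88    digest_extensions (128), digest_map (64), …      88 + 8 + 128 = 224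
      strncmp             6 pushes + sub 8 = 56     a check (16)                                      56 + 8 + 16 = 80
      gif_decode          5 pushes + sub 96 = 136   DGifSlurp (848), DGifOpen (528), digest_file (224), DGifCloseFile (160)   136 + 8 + 848 = 992
      prog_main           4 pushes + sub 136 = 168  gif_decode (992), memcpy (80)                   168 + 8 + 992 = 1168
-/
import Gif.Spec.CommonMore
import Gif.Spec.Reader
namespace Gif.Spec
open X86 X86.User Asan ProgX.Base ProgX.Base.Spec

/-! ### The digest -/

/-- **`digest_byte(rdi = h, esi = b)`** (gif_driver.c:89): `(h ^ (b & 0xff)) * FNV_PRIME`. A leaf without a frame and without a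
memory access. -/
def digest_byte.spec : Spec where
  pre _ := True
  post u v := v.mem = u.mem
  frame := 0
  writes _ := []

@[vspec] theorem digest_byte.spec_frame : digest_byte.spec.frame = 0 := id rfl
@[vspec] theorem digest_byte.spec_writes (u : State) : digest_byte.spec.writes u = [] := id rfl

/-- **`digest_int(rdi = h, esi = v)`** (gif_driver.c:95): four `digest_byte`. Nothing is written but 16 bytes of stack. -/
def digest_int.spec : Spec where
  pre _ := True
  post _ _ := True
  frame := 16
  writes _ := []

@[vspec] theorem digest_int.spec_frame : digest_int.spec.frame = 16 := id rfl
@[vspec] theorem digest_int.spec_writes (u : State) : digest_int.spec.writes u = [] := id rfl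

/-- **`digest_bytes(rdi = h, rsi = p, rdx = n)`** (gif_driver.c:104): reads `p[0 … n)`, each byte checked. `n = 0`, or the `n` bytes
lie inside one live object. -/
def digest_bytes.spec (H : Heap) (rest : List Obj) (frames : List (Nat × FrameLayout)) : Spec where
  pre u :=
    HeapPre H rest frames u ∧
    ((u.reg .rdx).toNat = 0 ∨ LiveIn (H.liveObjs ++ rest) frames (u.reg .rsi).toNat (u.reg .rdx).toNat)
  post u v :=
    ShadowUntouched u.mem v.mem
  frame := 64
  writes _ := []

@[vspec] theorem digest_bytes.spec_frame (H : Heap) (rest : List Obj) (frames : List (Nat × FrameLayout)) :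
    (digest_bytes.spec H rest frames).frame = 64 := id rfl
@[vspec] theorem digest_bytes.spec_writes (H : Heap) (rest : List Obj) (frames : List (Nat × FrameLayout)) (u : State) :
    (digest_bytes.spec H rest frames).writes u = [] := id rfl

/-- **`digest_map(rdi = h, rsi = map)`** (gif_driver.c:113): NULL: `digest_int(h, −1)`; otherwise reads `ColorCount`, `BitsPerPixel`,
`SortFlag` and the three bytes of every colour `i < ColorCount`. Ghost `m`: the pointer is NULL or the owned map `m` (`MapAt`). -/
def digest_map.spec (H : Heap) (rest : List Obj) (frames : List (Nat × FrameLayout)) (m : Option Map) : Spec where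
  pre u :=
    HeapPre H rest frames u ∧
    MapAt m (u.reg .rsi).toNat u.mem ∧
    Owns H (Map.objs m)
  post u v :=
    ShadowUntouched u.mem v.mem
  frame := 64
  writes _ := []

@[vspec] theorem digest_map.spec_frame (H : Heap) (rest : List Obj) (frames : List (Nat × FrameLayout)) (m : Option Map) :
    (digest_map.spec H rest frames m).frame = 64 := id rfl
@[vspec] theorem digest_map.spec_writes (H : Heap) (rest : List Obj) (frames : List (Nat × FrameLayout)) (m : Option Map)
    (u : State) : (digest_map.spec H rest frames m).writes u = [] := id rfl

/-- **`digest_extensions(rdi = h, esi = count, rdx = blocks)`** (gif_driver.c:130): `blocks == NULL`: nothing more; otherwise for every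
`i < count` reads `Function`, `ByteCount`, `Bytes` of block `i`, and — `Bytes` is NULL after a failed allocation (design F-2, X3):
TESTED — the `ByteCount` bytes at `Bytes`. Ghost `e`: the pair is `(0, 0)` or the owned list `e` (`ExtsAt`). -/
def digest_extensions.spec (H : Heap) (rest : List Obj) (frames : List (Nat × FrameLayout)) (e : Option Exts) : Spec where
  pre u :=
    HeapPre H rest frames u ∧
    ExtsAt e (u.reg .rdx).toNat ((u.reg .rsi).toNat % 2 ^ 32) u.mem ∧
    Owns H (Exts.objs e)
  post u v :=
    ShadowUntouched u.mem v.mem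
  frame := 128
  writes _ := []

@[vspec] theorem digest_extensions.spec_frame (H : Heap) (rest : List Obj) (frames : List (Nat × FrameLayout)) (e : Option Exts) :
    (digest_extensions.spec H rest frames e).frame = 128 := id rfl
@[vspec] theorem digest_extensions.spec_writes (H : Heap) (rest : List Obj) (frames : List (Nat × FrameLayout)) (e : Option Exts)
    (u : State) : (digest_extensions.spec H rest frames e).writes u = [] := id rfl

/-- **`digest_file(rdi = gif, rsi = pixels)`** (gif_driver.c:147): the five scalar fields of the screen, the screen's map,
`ImageCount`, and for every counted image its descriptor, its map, its RASTER (`Width · Height` bytes: every counted image must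
have one — `F.Complete`, what every return of DGifSlurp guarantees) and its extension list; the pending list; stores the pixel
total to `*pixels` (8 bytes of a caller's stack object). Pre: the common precondition `Env` (with the context: `Ctx.cursor_range`
puts the cursor above the function's own stack, so that `GifOK` can be carried) with every image complete. Nothing is written
but `*pixels` and 224 bytes of stack. -/
def digest_file.spec (H : Heap) (rest : List Obj) (frames : List (Nat × FrameLayout)) (F : Forest) (R : Rd) : Spec where
  pre u :=
    Env H rest frames F R u ∧
    F.Complete ∧
    (u.reg .rdi).toNat = F.gif ∧
    LiveIn (H.liveObjs ++ rest) frames (u.reg .rsi).toNat 8 ∧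
    0x700000 ≤ (u.reg .rsi).toNat ∧ (u.reg .rsi).toNat + 8 ≤ 0x800000
  post u v :=
    ShadowUntouched u.mem v.mem
  frame := 224
  writes u :=
    [⟨(u.reg .rsi).toNat, (u.reg .rsi).toNat + 8⟩]

@[vspec] theorem digest_file.spec_frame (H : Heap) (rest : List Obj) (frames : List (Nat × FrameLayout)) (F : Forest) (R : Rd) :
    (digest_file.spec H rest frames F R).frame = 224 := id rfl
@[vspec] theorem digest_file.spec_writes (H : Heap) (rest : List Obj) (frames : List (Nat × FrameLayout)) (F : Forest) (R : Rd)
    (u : State) :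
    (digest_file.spec H rest frames F R).writes u = [⟨(u.reg .rsi).toNat, (u.reg .rsi).toNat + 8⟩] := id rfl

/-! ### `strncmp` -/

/-- **`strncmp(rdi = a, rsi = b, rdx = n)`** (cextra.c:10): compares at most `n` characters; reads `a[i]`, `b[i]` only up to and
including the deciding position. Pre (more than it needs: what its one call site has): both strings have `n` readable bytes, each
inside one live object (DGifOpen: the registered literal "GIFVER", 7 bytes, and `Buf[7]`; `n = 3`). Stores nothing. -/
def strncmp.spec (others : List Obj) (frames : List (Nat × FrameLayout)) : Spec where
  pre u :=
    ShadowPre others frames u ∧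
    ((u.reg .rdx).toNat = 0 ∨
      (LiveIn others frames (u.reg .rdi).toNat (u.reg .rdx).toNat ∧
       LiveIn others frames (u.reg .rsi).toNat (u.reg .rdx).toNat))
  post u v :=
    ShadowUntouched u.mem v.mem
  frame := 80
  writes _ := []

@[vspec] theorem strncmp.spec_frame (others : List Obj) (frames : List (Nat × FrameLayout)) :
    (strncmp.spec others frames).frame = 80 := id rfl
@[vspec] theorem strncmp.spec_writes (others : List Obj) (frames : List (Nat × FrameLayout)) (u : State) :
    (strncmp.spec others frames).writes u = [] := id rfl

/-! ### The run -/

/-- **The image's four constants are registered globals** (the memory-independent half of K1: `Ctx.masks` … `Ctx.stamp`). -/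
structure GlobalsIn (rest : List Obj) : Prop where
  masks : Gif.Globals.CodeMasks.obj ∈ rest
  offs : Gif.Globals.InterlacedOffset.obj ∈ rest
  jumps : Gif.Globals.InterlacedJumps.obj ∈ rest
  stamp : Gif.Globals.LC7.obj ∈ rest

/-- **`gif_decode(rdi = in, rsi = n, rdx = report)`** (gif_driver.c:179; a PROTECTED frame: `error` and THE CURSOR): fills the report,
builds the cursor `{in, in + n}`, `DGifOpen(&cursor, mem_read, &error)`; NULL: records the error and returns; otherwise DGifSlurp
(result recorded, not acted upon), the digest, `DGifCloseFile(gif, &error)` — ALWAYS, also after a failed DGifSlurp.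
Pre: the heap's `HeapPre`; the input is empty or lies inside ONE object of `rest`; `report` points to 64 bytes of a caller's stack
object; the constants are registered and in memory. Post: A heap with its invariant. This is where the reader `R` and the context
`Ctx` of every function below are MADE: `R.cur` = the cursor of this frame. -/
def gif_decode.spec (H : Heap) (rest : List Obj) (frames : List (Nat × FrameLayout)) : Spec where
  pre u :=
    HeapPre H rest frames u ∧
    GlobalsIn rest ∧
    Consts u.mem ∧
    ((u.reg .rsi).toNat = 0 ∨ LiveIn rest [] (u.reg .rdi).toNat (u.reg .rsi).toNat) ∧
    LiveIn (H.liveObjs ++ rest) frames (u.reg .rdx).toNat 64 ∧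
    0x700000 ≤ (u.reg .rdx).toNat ∧ (u.reg .rdx).toNat + 64 ≤ 0x800000
  post u v :=
    ∃ H', SameRegion H H' ∧ HeapInv H' rest frames ((u.reg .rsp).toNat + 8) v.mem ∧ Consts v.mem
  frame := 992
  writes u :=
    [⟨0x800000, 0x1000020⟩,
     ⟨(u.reg .rdx).toNat, (u.reg .rdx).toNat + 64⟩]

@[vspec] theorem gif_decode.spec_frame (H : Heap) (rest : List Obj) (frames : List (Nat × FrameLayout)) :
    (gif_decode.spec H rest frames).frame = 992 := id rfl
@[vspec] theorem gif_decode.spec_writes (H : Heap) (rest : List Obj) (frames : List (Nat × FrameLayout)) (u : State) :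
    (gif_decode.spec H rest frames).writes u =
      [⟨0x800000, 0x1000020⟩,
       ⟨(u.reg .rdx).toNat, (u.reg .rdx).toNat + 64⟩] := id rfl

/-- **`prog_main(rdi = in, rsi = len, rdx = out, rcx = cap, r8 = heap, r9 = heap_len)`** (gif_driver.c:245; a PROTECTED frame: the
64-byte `report`): `len < 0`: returns 0; `gif_decode(in, len, &report)`; `cap < 64`: returns 0; `memcpy(out, &report, 64)`, returns 64.
Pre: the heap's `HeapPre` (at the stub's call: the EMPTY heap, `Top.mainPre_heapPre`); the input — if `len` is positive as a
signed number — lies inside one object of `rest`; the output — if `cap ≥ 64` as a signed number — has 64 live bytes in one object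
of `rest`; the constants are registered and in memory (`Consts`: the stub's statement carries it from the start state, where it is a
fact about the file's bytes). Post: nothing is asked (the stub needs nothing of the memory after `prog_main` but the text). -/
def prog_main.spec (H : Heap) (rest : List Obj) (frames : List (Nat × FrameLayout)) : Spec where
  pre u :=
    HeapPre H rest frames u ∧
    GlobalsIn rest ∧
    Consts u.mem ∧
    ((u.reg .rsi).toNat < 2 ^ 63 → (u.reg .rsi).toNat = 0 ∨ LiveIn rest [] (u.reg .rdi).toNat (u.reg .rsi).toNat) ∧
    (64 ≤ (u.reg .rcx).toNat → (u.reg .rcx).toNat < 2 ^ 63 → LiveIn rest [] (u.reg .rdx).toNat 64)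
  post _ _ := True
  frame := 1168
  writes u :=
    [⟨0x800000, 0x1000020⟩,
     ⟨(u.reg .rdx).toNat, (u.reg .rdx).toNat + 64⟩]

@[vspec] theorem prog_main.spec_frame (H : Heap) (rest : List Obj) (frames : List (Nat × FrameLayout)) :
    (prog_main.spec H rest frames).frame = 1168 := id rfl
@[vspec] theorem prog_main.spec_writes (H : Heap) (rest : List Obj) (frames : List (Nat × FrameLayout)) (u : State) :
    (prog_main.spec H rest frames).writes u =
      [⟨0x800000, 0x1000020⟩,
       ⟨(u.reg .rdx).toNat, (u.reg .rdx).toNat + 64⟩] := id rfl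

end Gif.Spec
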